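-- pv_equiv track=rewrite | github.com/m-ttaylor/adventofcode | 2023/day12/solution.py | countContig
-- ===== SOURCE A (Python) =====
-- def countContig(line):
--     contig = []
--     i = 0
--     ccount = 0
--     while i < len(line):
--         while i < len(line) and line[i] in {"#", "?"}:
--             ccount += 1
--             i += 1
--
--         contig.append(ccount)
--         ccount = 0
--         i += 1
--     return contig
-- ===== SOURCE B (Python) =====
-- def countContig(line):
--     contig = []
--     ccount = 0
--     for c in line:
--         if c in "#?":
--             ccount += 1
--         else:
--             contig.append(ccount)
--             ccount = 0
--     if line and line[-1] in "#?":
--         contig.append(ccount)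
--     return contig
-- ===== Notes on version B (the rewrite author's own statement) =====
-- stated objective: idiomatic
-- what changed: Replaced the nested while-loops with explicit index arithmetic by a single for-each pass over the characters with an integer run accumulator and a post-loop flush guarded by the last character.
import Mathlib
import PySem

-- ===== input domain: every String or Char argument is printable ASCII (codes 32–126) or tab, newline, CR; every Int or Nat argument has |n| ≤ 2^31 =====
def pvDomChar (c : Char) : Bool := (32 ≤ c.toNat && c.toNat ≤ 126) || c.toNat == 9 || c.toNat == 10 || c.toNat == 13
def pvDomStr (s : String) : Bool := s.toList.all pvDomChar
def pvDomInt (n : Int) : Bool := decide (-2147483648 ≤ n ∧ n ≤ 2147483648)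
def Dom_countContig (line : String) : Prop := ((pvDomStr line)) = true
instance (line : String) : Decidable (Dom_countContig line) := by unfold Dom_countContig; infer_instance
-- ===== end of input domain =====

-- B replaces A's nested index-driven while-loops by one for-each pass with a run accumulator and a final flush (idiomatic decomposition, same O(n) cost).

-- ===== PORT A =====
-- inner while-loop of A: consume a run of '#'/'?' from the front, returning the
-- incremented ccount and the remaining characters (position i).
def countContigInner : List Char → Int → Int × List Char
  | [], n => (n, [])
  | c :: rest, n =>
      if c == '#' || c == '?' then countContigInner rest (n + 1) else (n, c :: rest)

theorem countContigInner_len (l : List Char) (n : Int) :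
    (countContigInner l n).2.length ≤ l.length := by
  induction l generalizing n with
  | nil => simp [countContigInner]
  | cons c rest ih =>
      simp only [countContigInner]
      split
      · exact Nat.le_trans (ih _) (Nat.le_succ _)
      · simp

-- outer while-loop of A: after the inner run, append ccount, reset, and i += 1
-- (drop one character: the separator, or past the end).
def countContigOuter : List Char → List Int
  | [] => []
  | c :: rest =>
      (countContigInner (c :: rest) 0).1 ::
        countContigOuter (countContigInner (c :: rest) 0).2.tail
termination_by l => l.length
decreasing_by
  have h := countContigInner_len (c :: rest) 0
  simp only [List.length_cons] at *
  cases hp : (countContigInner (c :: rest) 0).2 with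
  | nil => simp
  | cons d r => rw [hp] at h; simp at h ⊢; omega

def countContig (line : String) : List Int := countContigOuter line.toList

-- ===== PORT B =====
-- the for-loop of B: carry the output list and the current run count.
def countContigLoop : List Char → List Int → Int → List Int × Int
  | [], acc, n => (acc, n)
  | c :: rest, acc, n =>
      if c == '#' || c == '?' then countContigLoop rest acc (n + 1)
      else countContigLoop rest (acc ++ [n]) 0

def countContig_alt (line : String) : List Int :=
  let p := countContigLoop line.toList [] 0
  -- `if line and line[-1] in "#?"`: nonempty and last char a run character
  match line.toList.getLast? with
  | none => p.1
  | some c => if c == '#' || c == '?' then p.1 ++ [p.2] else p.1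

-- ===== PRECONDITION & SPEC =====
def Spec_countContig (line : String) (out : List Int) : Prop := out = countContig_alt line
instance (line : String) (out : List Int) : Decidable (Spec_countContig line out) := by unfold Spec_countContig; infer_instance

-- ===== CLAIM (what is proved, stated in full; the proofs are below) =====
def Claim_equal_countContig : Prop := ∀ (line : String), Dom_countContig line → Spec_countContig line (countContig line)

-- ===== LEMMAS AND PROOFS =====

-- the accumulator of B's loop is a pure prefix
theorem countContigLoop_acc (l : List Char) (acc : List Int) (n : Int) :
    countContigLoop l acc n =
      (acc ++ (countContigLoop l [] n).1, (countContigLoop l [] n).2) := by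
  induction l generalizing acc n with
  | nil => simp [countContigLoop]
  | cons c rest ih =>
      simp only [countContigLoop]
      split
      · exact ih acc (n + 1)
      · rw [ih (acc ++ [n]) 0]
        simp only [List.nil_append]
        rw [ih [n] 0]
        simp

-- B's loop decomposed along A's inner run-consumer
theorem countContigLoop_inner (l : List Char) (n : Int) :
    countContigLoop l [] n =
      (match (countContigInner l n).2 with
       | [] => ([], (countContigInner l n).1)
       | _ :: rest' =>
           ((countContigInner l n).1 :: (countContigLoop rest' [] 0).1,
            (countContigLoop rest' [] 0).2)) := by
  induction l generalizing n with
  | nil => simp [countContigLoop, countContigInner]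
  | cons c rest ih =>
      simp only [countContigLoop, countContigInner]
      split
      · exact ih (n + 1)
      · simp only [List.nil_append]
        rw [countContigLoop_acc rest [n] 0]
        simp

-- the remainder returned by A's inner loop: either everything was a run
-- character, or it starts with a non-run character and shares l's last element
theorem countContigInner_cases (l : List Char) (n : Int) :
    ((countContigInner l n).2 = [] ∧ ∀ c ∈ l, (c == '#' || c == '?') = true) ∨
    (∃ c r, (countContigInner l n).2 = c :: r ∧ (c == '#' || c == '?') = false ∧
      l.getLast? = (c :: r).getLast?) := by
  induction l generalizing n with
  | nil => left; simp [countContigInner]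
  | cons c rest ih =>
      simp only [countContigInner]
      split
      · rename_i hrun
        rcases ih (n + 1) with ⟨h1, h2⟩ | ⟨d, r, h1, h2, h3⟩
        · left
          refine ⟨h1, ?_⟩
          intro x hx
          rcases List.mem_cons.mp hx with h | h
          · exact h ▸ hrun
          · exact h2 x h
        · right
          refine ⟨d, r, h1, h2, ?_⟩
          rw [← h3]
          cases rest with
          | nil => simp [countContigInner] at h1
          | cons e r' => simp [List.getLast?_cons_cons]
      · rename_i hrun
        right
        exact ⟨c, rest, rfl, by simpa using hrun, rfl⟩

-- main equivalence on character lists, by A's recursion structure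
theorem countContig_main (l : List Char) :
    countContigOuter l =
      (match l.getLast? with
       | none => (countContigLoop l [] 0).1
       | some c =>
           if c == '#' || c == '?' then
             (countContigLoop l [] 0).1 ++ [(countContigLoop l [] 0).2]
           else (countContigLoop l [] 0).1) := by
  fun_induction countContigOuter l with
  | case1 => simp [countContigLoop]
  | case2 c rest ih =>
      rw [countContigLoop_inner]
      rcases countContigInner_cases (c :: rest) 0 with ⟨h1, h2⟩ | ⟨d, r, h1, h2, h3⟩
      · -- whole string is one run of '#'/'?'
        cases he : (c :: rest).getLast? with
        | none => simp at he
        | some e =>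
            have hrun : (e == '#' || e == '?') = true :=
              h2 e (List.mem_of_getLast? he)
            simp [h1, hrun, countContigOuter]
      · rw [h1] at ih ⊢
        simp only [List.tail_cons] at ih
        cases r with
        | nil => simp [h3, h2, countContigOuter, countContigLoop]
        | cons e r' =>
            simp only [List.tail_cons]
            rw [h3, List.getLast?_cons_cons, ih]
            cases hg : (e :: r').getLast? with
            | none => simp at hg
            | some x =>
                by_cases hx : (x == '#' || x == '?') = true
                · simp [hx]
                · simp [hx]

-- ===== VERDICT (by name: the statement is the Claim_ definition above) =====
theorem countContig_spec : Claim_equal_countContig := by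
  intro line _
  unfold Spec_countContig countContig countContig_alt
  exact countContig_main line.toList
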